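-- pv_equiv track=rewrite | github.com/stolniceanudenisa/Python-Algorithms-and-Programming | Seminare/Seminar4/solutie_procedurala_ok_ptr_lab_5/structura_lab_6_procedural.py | sterge_avion
-- ===== SOURCE A (Python) =====
-- def get_cod(avion):
--     return avion["cod"]
--
-- def sterge_avion(lista_avioane, cod):
--     '''
--     Functie care sterge un aviod dupa codul sau unic
--     :param lista_avioane:
--     :param cod: codul unic de identificare al avionului
--     :return: avion_sters
--     '''
--
--     avion_sters = {}
--     i = 0
--     while i < len(lista_avioane):
--         avion_curent = lista_avioane[i]
--         if get_cod(avion_curent) == cod: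
--             avion_sters = lista_avioane.pop(i)
--             i = i - 1
--         i = i + 1
--     return avion_sters
-- ===== SOURCE B (Python) =====
-- def sterge_avion(lista_avioane, cod):
--     deleted = {}
--     kept = []
--     for avion in lista_avioane:
--         if avion["cod"] == cod:
--             deleted = avion
--         else:
--             kept.append(avion)
--     lista_avioane[:] = kept
--     return deleted
-- ===== Notes on version B (the rewrite author's own statement) =====
-- stated objective: simpler
-- what changed: Replaces the index-backtracking while-loop that pops matches in place (with i = i - 1 compensation) by a single forward pass accumulating survivors into a fresh list, then slice-assigning it back; the deleted plane is overwritten on each match so the last match is returned, {} if none.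
import Mathlib
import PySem

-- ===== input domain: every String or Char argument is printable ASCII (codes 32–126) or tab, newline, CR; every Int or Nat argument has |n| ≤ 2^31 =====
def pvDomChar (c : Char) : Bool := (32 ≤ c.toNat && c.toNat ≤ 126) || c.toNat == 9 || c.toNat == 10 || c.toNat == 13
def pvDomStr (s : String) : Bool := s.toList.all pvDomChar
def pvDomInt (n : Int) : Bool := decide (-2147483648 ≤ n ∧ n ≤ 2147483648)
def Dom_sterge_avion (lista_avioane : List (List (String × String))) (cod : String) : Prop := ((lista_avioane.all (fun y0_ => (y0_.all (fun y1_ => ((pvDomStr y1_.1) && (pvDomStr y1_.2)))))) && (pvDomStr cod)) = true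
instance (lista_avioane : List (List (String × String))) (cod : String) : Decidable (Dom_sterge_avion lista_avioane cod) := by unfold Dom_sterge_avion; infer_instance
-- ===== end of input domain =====

-- B replaces A's index-backtracking in-place pop loop by one forward pass collecting survivors
-- then slice-assigning them back; both mutate lista_avioane identically, equivalence proved on the return value.

-- ===== PORT A =====
-- avion["cod"]: first-match association-list lookup; none = KeyError (excluded by Pre_)
def get_cod (avion : List (String × String)) : Option String :=
  (avion.find? (fun p => p.1 == "cod")).map (·.2)

-- the while loop: state (lista_avioane, i, avion_sters); on a match the element is popped
-- (List.eraseIdx i = list.pop(i) for an in-range index) and i-1 then i+1 leave i unchanged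
def sterge_avion_go (cod : String) (lista : List (List (String × String))) (i : Nat)
    (avion_sters : List (String × String)) : List (String × String) :=
  if h : i < lista.length then
    let avion_curent := lista[i]
    if get_cod avion_curent = some cod then
      sterge_avion_go cod (lista.eraseIdx i) i avion_curent
    else
      sterge_avion_go cod lista (i + 1) avion_sters
  else avion_sters
termination_by lista.length - i
decreasing_by
  · have := List.length_eraseIdx_of_lt h; omega
  · omega

def sterge_avion (lista_avioane : List (List (String × String))) (cod : String) : List (String × String) :=
  sterge_avion_go cod lista_avioane 0 []

-- ===== PORT B =====
-- one forward pass: state (deleted, kept); return deleted (kept is the list's new contents)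
def sterge_avion_alt (lista_avioane : List (List (String × String))) (cod : String) : List (String × String) :=
  (lista_avioane.foldl
    (fun (st : List (String × String) × List (List (String × String))) avion =>
      if get_cod avion = some cod then (avion, st.2) else (st.1, st.2 ++ [avion]))
    ([], [])).1

-- ===== PRECONDITION & SPEC =====
-- Pre_ excludes exactly the inputs where Python A raises KeyError: a plane dict without key "cod".
def Pre_sterge_avion (lista_avioane : List (List (String × String))) (cod : String) : Prop :=
  ∀ avion ∈ lista_avioane, (get_cod avion).isSome
instance (lista_avioane : List (List (String × String))) (cod : String) : Decidable (Pre_sterge_avion lista_avioane cod) := by unfold Pre_sterge_avion; infer_instance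

def pvWitness_sterge_avion : (List (List (String × String))) × String :=
  ([[("cod", "A1"), ("nume", "x")], [("cod", "B2")]], "B2")

def Spec_sterge_avion (lista_avioane : List (List (String × String))) (cod : String) (out : List (String × String)) : Prop := out = sterge_avion_alt lista_avioane cod
instance (lista_avioane : List (List (String × String))) (cod : String) (out : List (String × String)) : Decidable (Spec_sterge_avion lista_avioane cod out) := by unfold Spec_sterge_avion; infer_instance

-- ===== CLAIM (what is proved, stated in full; the proofs are below) =====
def Claim_equal_sterge_avion : Prop := ∀ (lista_avioane : List (List (String × String))) (cod : String), Dom_sterge_avion lista_avioane cod → Pre_sterge_avion lista_avioane cod → Spec_sterge_avion lista_avioane cod (sterge_avion lista_avioane cod)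

-- ===== LEMMAS AND PROOFS =====

-- list.pop(i) leaves the not-yet-visited tail unchanged: drop i (eraseIdx l i) = drop (i+1) l
theorem drop_eraseIdx_self {α : Type} : ∀ {i : Nat} {l : List α},
    (l.eraseIdx i).drop i = l.drop (i + 1) := by
  intro i
  induction i with
  | zero => intro l; cases l <;> rfl
  | succ j ih => intro l; cases l with
    | nil => rfl
    | cons x xs => simpa using ih

-- A's loop returns the last matching element among positions ≥ i (acc if none):
-- a fold of the "keep the match" step over the tail the loop has not yet visited.
theorem sterge_avion_go_eq_foldl (cod : String) :
    ∀ (lista : List (List (String × String))) (i : Nat) (acc : List (String × String)),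
      sterge_avion_go cod lista i acc =
        (lista.drop i).foldl
          (fun a avion => if get_cod avion = some cod then avion else a) acc := by
  intro lista i acc
  induction hn : lista.length - i using Nat.strong_induction_on generalizing lista i acc with
  | _ n ih =>
    rw [sterge_avion_go]
    by_cases h : i < lista.length
    · simp only [h, dif_pos]
      have hdrop : lista.drop i = lista[i] :: lista.drop (i + 1) :=
        List.drop_eq_getElem_cons h
      by_cases hm : get_cod lista[i] = some cod
      · simp only [hm, if_pos]
        have hlen := List.length_eraseIdx_of_lt h
        have h1 : (lista.eraseIdx i).length - i < n := by omega
        rw [ih _ h1 _ _ _ rfl]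
        rw [drop_eraseIdx_self, hdrop, List.foldl_cons, if_pos hm]
      · simp only [hm, if_neg, not_false_iff]
        have h1 : lista.length - (i + 1) < n := by omega
        rw [ih _ h1 _ _ _ rfl, hdrop, List.foldl_cons, if_neg hm]
    · simp only [h, dif_neg, not_false_iff]
      rw [List.drop_eq_nil_of_le (Nat.le_of_not_lt h)]
      rfl

-- B's paired fold projects to the same plain fold (kept never feeds back into deleted).
theorem foldl_pair_fst (cod : String) :
    ∀ (l : List (List (String × String))) (d : List (String × String))
      (k : List (List (String × String))),
      (l.foldl
        (fun (st : List (String × String) × List (List (String × String))) avion =>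
          if get_cod avion = some cod then (avion, st.2) else (st.1, st.2 ++ [avion]))
        (d, k)).1 =
      l.foldl (fun a avion => if get_cod avion = some cod then avion else a) d := by
  intro l
  induction l with
  | nil => intro d k; rfl
  | cons x xs ih =>
    intro d k
    simp only [List.foldl_cons]
    by_cases hm : get_cod x = some cod <;> simp [hm, ih]

-- ===== VERDICT (by name: the statement is the Claim_ definition above) =====
theorem sterge_avion_spec : Claim_equal_sterge_avion := by
  intro lista cod _ _
  unfold Spec_sterge_avion sterge_avion sterge_avion_alt
  rw [sterge_avion_go_eq_foldl, foldl_pair_fst]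
  simp
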